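-- pv_equiv track=rewrite | github.com/724thomas/CodingChallenge_Python | baekjoon/20117.py | solution
-- ===== SOURCE A (Python) =====
-- def solution(n, arr):
--     arr.sort()
--     odd = len(arr) % 2
--     ans = 0
--     for i in range(len(arr) // 2):
--         ans += arr.pop() * 2
--     if odd:
--         ans += arr.pop()
--     return ans
-- ===== SOURCE B (Python) =====
-- def solution(n, arr):
--     s = sorted(arr)
--     k = len(s) // 2
--     return sum(s) + sum(s[len(s) - k:]) - sum(s[:k])
-- ===== Notes on version B (the rewrite author's own statement) =====
-- stated objective: simpler
-- what changed: A's destructive loop that pops the top half off the sorted list while accumulating doubled values (plus a final pop for the median) is replaced by a closed-form expression: sum(s) + sum(top half) - sum(bottom half) over one non-mutating sorted copy.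
import Mathlib
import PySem

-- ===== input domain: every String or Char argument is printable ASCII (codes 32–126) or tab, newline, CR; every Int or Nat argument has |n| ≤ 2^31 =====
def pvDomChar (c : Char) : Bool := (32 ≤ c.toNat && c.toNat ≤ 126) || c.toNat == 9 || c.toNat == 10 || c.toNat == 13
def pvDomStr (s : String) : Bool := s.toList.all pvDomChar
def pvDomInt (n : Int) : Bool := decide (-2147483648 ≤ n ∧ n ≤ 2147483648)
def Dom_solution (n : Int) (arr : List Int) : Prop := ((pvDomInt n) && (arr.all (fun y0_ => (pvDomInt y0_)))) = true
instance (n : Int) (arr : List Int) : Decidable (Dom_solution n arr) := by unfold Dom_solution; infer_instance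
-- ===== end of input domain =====

-- B (simpler): A's destructive pop-loop over the sorted list is replaced by a closed-form slice-sum
-- over one sorted copy; equal return values are proved — A additionally mutates arr in place
-- (sorts it and removes its top half), B does not.

-- ===== PORT A =====
def solution (n : Int) (arr : List Int) : Int :=
  let s := PySem.List.sorted arr (fun x => x) false        -- arr.sort()
  let odd := PySem.Int.mod (PySem.List.len s) 2            -- odd = len(arr) % 2
  let st := (PySem.List.pyRange 0 (PySem.Int.floordiv (PySem.List.len s) 2) 1).foldl
      (fun (st : List Int × Int) _ =>
        match PySem.List.pop? st.1 with                    -- ans += arr.pop() * 2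
        | some (v, rest) => (rest, st.2 + v * 2)
        | none => st)                                      -- pop of empty list: never reached (loop runs len//2 times)
      (s, 0)                                               -- ans = 0
  if odd ≠ 0 then                                          -- if odd:
    match PySem.List.pop? st.1 with                        -- ans += arr.pop()
    | some (v, _) => st.2 + v
    | none => st.2                                         -- never reached (odd length leaves a nonempty remainder)
  else st.2

-- ===== PORT B =====
def solution_alt (n : Int) (arr : List Int) : Int :=
  let s := PySem.List.sorted arr (fun x => x) false        -- s = sorted(arr)
  let k := PySem.Int.floordiv (PySem.List.len s) 2         -- k = len(s) // 2
  s.sum + (PySem.List.slice s (some (PySem.List.len s - k)) none).sum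
        - (PySem.List.slice s none (some k)).sum           -- sum(s) + sum(s[len(s)-k:]) - sum(s[:k])

-- ===== PRECONDITION & SPEC =====
def Spec_solution (n : Int) (arr : List Int) (out : Int) : Prop := out = solution_alt n arr
instance (n : Int) (arr : List Int) (out : Int) : Decidable (Spec_solution n arr out) := by unfold Spec_solution; infer_instance

-- ===== CLAIM (what is proved, stated in full; the proofs are below) =====
def Claim_equal_solution : Prop := ∀ (n : Int) (arr : List Int), Dom_solution n arr → Spec_solution n arr (solution n arr)

-- ===== LEMMAS AND PROOFS =====

-- A's loop, popping j times from the back of l: remainder is the first (length−j) elements,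
-- the accumulator gains twice the sum of the last j.
theorem popLoop_eq (l : List Int) (j : Nat) (hj : j ≤ l.length) (ans : Int) :
    (PySem.List.pyRange 0 (j : Int) 1).foldl
      (fun (st : List Int × Int) _ =>
        match PySem.List.pop? st.1 with
        | some (v, rest) => (rest, st.2 + v * 2)
        | none => st) (l, ans)
    = (l.take (l.length - j), ans + 2 * ((l.drop (l.length - j)).sum)) := by
  induction j with
  | zero =>
      simp [PySem.List.pyRange_one_eq_nil (by omega : (0:Int) ≤ 0)]
  | succ j ih =>
      have hj' : j ≤ l.length := by omega
      have hcast : ((j : Int) + 1) = ((j + 1 : Nat) : Int) := by push_cast; ring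
      rw [← hcast, PySem.List.pyRange_one_succ_right (by positivity), List.foldl_append,
        ih hj']
      have hm : l.length - (j + 1) < l.length := by omega
      have hs : l.length - j = (l.length - (j + 1)) + 1 := by omega
      have htake : l.take (l.length - j)
          = l.take (l.length - (j + 1)) ++ [l[l.length - (j + 1)]] := by
        rw [hs, List.take_add_one, List.getElem?_eq_getElem hm]
        simp
      have hdrop : l.drop (l.length - (j + 1))
          = l[l.length - (j + 1)] :: l.drop (l.length - j) := by
        rw [hs, List.drop_eq_getElem_cons hm]
      simp only [List.foldl_cons, List.foldl_nil, htake, PySem.List.pop?_last, hdrop,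
        List.sum_cons, Prod.mk.injEq]
      exact ⟨trivial, by ring⟩

-- ===== VERDICT (by name: the statement is the Claim_ definition above) =====
theorem solution_spec : Claim_equal_solution := by
  intro n arr _
  unfold Spec_solution solution solution_alt
  set s := PySem.List.sorted arr (fun x => x) false with hsdef
  simp only [PySem.List.len_eq]
  have hfd : PySem.Int.floordiv (s.length : Int) 2 = ((s.length / 2 : Nat) : Int) := by
    exact_mod_cast PySem.Int.floordiv_natCast s.length 2
  have hmd : PySem.Int.mod (s.length : Int) 2 = ((s.length % 2 : Nat) : Int) := by
    exact_mod_cast PySem.Int.mod_natCast s.length 2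
  rw [hfd, hmd, popLoop_eq s (s.length / 2) (Nat.div_le_self _ _) 0]
  set L := s.length with hL
  set k := L / 2 with hk
  have hkle : k ≤ L := Nat.div_le_self _ _
  have hslice1 : PySem.List.slice s (some ((L : Int) - ((k : Nat) : Int))) none
      = s.drop (L - k) := by
    have hcast : ((L : Int) - ((k : Nat) : Int)) = (((L - k : Nat)) : Int) := by
      push_cast [Nat.cast_sub hkle]; ring
    rw [hcast, PySem.List.slice_from_natCast]
  have hslice2 : PySem.List.slice s none (some ((k : Nat) : Int)) = s.take k := by
    rw [PySem.List.slice_to_natCast]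
  rw [hslice1, hslice2]
  have hsum : (s.take (L - k)).sum + (s.drop (L - k)).sum = s.sum := by
    rw [← List.sum_append, List.take_append_drop]
  by_cases hodd : L % 2 = 0
  · -- even length: the final pop is skipped and L - k = k
    have hLk : L - k = k := by omega
    have hne : ¬ (((L % 2 : Nat) : Int) ≠ 0) := by simp [hodd]
    rw [if_neg hne]
    rw [hLk] at hsum ⊢
    simp only [zero_add]
    linarith
  · -- odd length: the remainder s.take (k+1) is popped once more, yielding s[k]
    have h1 : L % 2 = 1 := by omega
    have hLk : L - k = k + 1 := by omega
    have hkL : k < L := by omega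
    have hne : (((L % 2 : Nat) : Int) ≠ 0) := by simp [h1]
    rw [if_pos hne]
    have htake : s.take (L - k) = s.take k ++ [s[k]] := by
      rw [hLk, List.take_add_one, List.getElem?_eq_getElem hkL]
      simp
    simp only [htake, PySem.List.pop?_last, zero_add]
    have hsum2 : (s.take k).sum + s[k] + (s.drop (L - k)).sum = s.sum := by
      rw [htake] at hsum
      simp only [List.sum_append, List.sum_cons, List.sum_nil] at hsum
      linarith
    linarith
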